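-- pv_equiv track=rewrite | github.com/Palak18507/Exam_Repo | scripts/cleaning/text_to_json.py | split_questions_in_units
-- ===== SOURCE A (Python) =====
-- def split_questions_in_units(units):
--     questions = []
--
--     for unit, lines in units.items():
--         current_qid = None
--         buffer = []
--
--         for line in lines:
--             if line.startswith("Q") and len(line) > 1 and line[1].isdigit():
--                 if current_qid:
--                     questions.append({
--                         "question_id": current_qid,
--                         "unit": unit,
--                         "raw_text": " ".join(buffer).strip()
--                     })
--
--                 parts = line.split(maxsplit=1)
--                 current_qid = parts[0]
--                 buffer = [parts[1]] if len(parts) > 1 else []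
--
--             elif current_qid:
--                 buffer.append(line)
--
--         if current_qid:
--             questions.append({
--                 "question_id": current_qid,
--                 "unit": unit,
--                 "raw_text": " ".join(buffer).strip()
--             })
--
--     return questions
-- ===== SOURCE B (Python) =====
-- def _is_q(line):
--     return line.startswith("Q") and len(line) > 1 and line[1].isdigit()
--
--
-- def split_questions_in_units(units):
--     # Chunk-slicing algorithm: instead of a per-line state machine, repeatedly
--     # locate the next header and slice off one whole chunk at a time.
--     questions = []
--     for unit, lines in units.items():
--         # cut away everything before the first header line
--         rest = lines[next((i for i, l in enumerate(lines) if _is_q(l)), len(lines)):]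
--         while rest:
--             body = rest[1:]
--             k = next((i for i, l in enumerate(body) if _is_q(l)), len(body))
--             parts = rest[0].split(maxsplit=1)
--             questions.append({
--                 "question_id": parts[0],
--                 "unit": unit,
--                 "raw_text": " ".join(parts[1:] + body[:k]).strip(),
--             })
--             rest = body[k:]
--     return questions
-- ===== Notes on version B (the rewrite author's own statement) =====
-- stated objective: alternative
-- what changed: Replaces A's per-line state machine (current_qid/buffer with mid-loop and trailing flushes) by chunk slicing: skip to the first header, then repeatedly locate the next header index and slice off one whole (header, body) chunk per iteration, emitting its record directly.
import Mathlib
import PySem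

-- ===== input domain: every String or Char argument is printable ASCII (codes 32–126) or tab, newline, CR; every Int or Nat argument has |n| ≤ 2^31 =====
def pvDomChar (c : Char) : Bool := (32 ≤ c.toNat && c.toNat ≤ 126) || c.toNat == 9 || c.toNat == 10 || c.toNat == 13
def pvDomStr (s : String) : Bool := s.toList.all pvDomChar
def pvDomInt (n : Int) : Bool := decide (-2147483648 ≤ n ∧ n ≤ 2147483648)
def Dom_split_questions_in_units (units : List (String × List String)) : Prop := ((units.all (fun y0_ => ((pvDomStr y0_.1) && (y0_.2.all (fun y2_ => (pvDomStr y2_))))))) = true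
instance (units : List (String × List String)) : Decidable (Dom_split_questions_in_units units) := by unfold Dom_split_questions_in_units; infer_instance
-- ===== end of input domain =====

-- B replaces A's per-line state machine by chunk slicing (find next header index, slice off one chunk per iteration); same results, similar cost (objective: alternative).

-- ===== PORT A =====
-- the Q-line test: line.startswith("Q") and len(line) > 1 and line[1].isdigit()
def pvIsQ (line : String) : Bool :=
  PySem.Str.startswith line "Q" && decide (1 < PySem.Str.len line) &&
    (match PySem.Str.pyGet? line 1 with
     | some c => PySem.Chars.isdigit c
     | none => false)

-- the record dict {"question_id": qid, "unit": unit, "raw_text": " ".join(buf).strip()}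
def pvRec (unit qid : String) (buf : List String) : List (String × String) :=
  [("question_id", qid), ("unit", unit), ("raw_text", PySem.Str.strip (PySem.Str.join " " buf))]

-- A's 'if current_qid: questions.append(...)' (Python truthiness: None and "" are falsy)
def pvFlush (unit : String) (cq : Option String) (buf : List String)
    (qs : List (List (String × String))) : List (List (String × String)) :=
  match cq with
  | some q => if q = "" then qs else qs ++ [pvRec unit q buf]
  | none => qs

-- one iteration of A's inner loop over the state (current_qid, buffer, questions)
def pvStepA (unit : String) (st : Option String × List String × List (List (String × String)))
    (line : String) : Option String × List String × List (List (String × String)) :=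
  match st with
  | (cq, buf, qs) =>
    if pvIsQ line then
      match PySem.Str.split₀Max line 1 with
      | [] => (cq, buf, qs)  -- unreachable: a pvIsQ line starts with 'Q', so split() is nonempty (Python's parts[0] would raise)
      | [q] => (some q, [], pvFlush unit cq buf qs)
      | q :: p1 :: _ => (some q, [p1], pvFlush unit cq buf qs)
    else
      match cq with
      | some q => if q = "" then (cq, buf, qs) else (some q, buf ++ [line], qs)
      | none => (cq, buf, qs)

-- A's trailing flush applied to the final loop state
def pvFinish (unit : String) (st : Option String × List String × List (List (String × String))) :
    List (List (String × String)) :=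
  pvFlush unit st.1 st.2.1 st.2.2

def split_questions_in_units (units : List (String × List String)) : List (List (String × String)) :=
  units.foldl (fun qs p => pvFinish p.1 (p.2.foldl (pvStepA p.1) (none, [], qs))) []

-- ===== PORT B =====
-- Source B's while loop over 'rest': slice off one (header, body-up-to-next-header) chunk per
-- iteration. 'next((i for i,l in enumerate(xs) if _is_q(l)), len(xs))' is List.findIdx pvIsQ
-- (first index satisfying the test, length if none — exact); the slices body[:k] / body[k:]
-- have 0 ≤ k ≤ len(body), where Python slicing is exactly List.take / List.drop.
def pvChunks (unit : String) : List String → List (List (String × String)) → List (List (String × String))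
  | [], qs => qs
  | h :: body, qs =>
    match PySem.Str.split₀Max h 1 with
    | [] => qs  -- unreachable: h starts with 'Q', so split() is nonempty (Python's parts[0] would raise)
    | q :: ps =>
      pvChunks unit (body.drop (body.findIdx pvIsQ))
        (qs ++ [pvRec unit q (ps ++ body.take (body.findIdx pvIsQ))])
termination_by rest _ => rest.length
decreasing_by simp [List.length_drop]

def split_questions_in_units_alt (units : List (String × List String)) : List (List (String × String)) :=
  units.foldl (fun qs p => pvChunks p.1 (p.2.drop (p.2.findIdx pvIsQ)) qs) []

-- ===== PRECONDITION & SPEC =====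
def Spec_split_questions_in_units (units : List (String × List String)) (out : List (List (String × String))) : Prop := out = split_questions_in_units_alt units
instance (units : List (String × List String)) (out : List (List (String × String))) : Decidable (Spec_split_questions_in_units units out) := by unfold Spec_split_questions_in_units; infer_instance

-- ===== CLAIM (what is proved, stated in full; the proofs are below) =====
def Claim_equal_split_questions_in_units : Prop := ∀ (units : List (String × List String)), Dom_split_questions_in_units units → Spec_split_questions_in_units units (split_questions_in_units units)

-- ===== LEMMAS AND PROOFS =====

-- first-match index vs takeWhile/dropWhile of the negated test
theorem take_findIdx {α : Type} (p : α → Bool) (l : List α) :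
    l.take (l.findIdx p) = l.takeWhile (fun x => !p x) := by
  induction l with
  | nil => rfl
  | cons x xs ih =>
    by_cases h : p x = true
    · simp [List.findIdx_cons, h]
    · simp only [Bool.not_eq_true] at h
      simp [List.findIdx_cons, h, ih]

theorem drop_findIdx {α : Type} (p : α → Bool) (l : List α) :
    l.drop (l.findIdx p) = l.dropWhile (fun x => !p x) := by
  induction l with
  | nil => rfl
  | cons x xs ih =>
    by_cases h : p x = true
    · simp [List.findIdx_cons, h]
    · simp only [Bool.not_eq_true] at h
      simp [List.findIdx_cons, h, ih]

-- shape of line.split(maxsplit=1) for a line whose first char is not whitespace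
theorem charsSplitQ (c : Char) (hc : PySem.Chars.isspace c = false) (cs : List Char) :
    PySem.Chars.split₀Max (c::cs) 1 = [c :: cs.takeWhile (fun x => !PySem.Chars.isspace x)] ∨
    ∃ r, PySem.Chars.split₀Max (c::cs) 1 = [c :: cs.takeWhile (fun x => !PySem.Chars.isspace x), r] := by
  have h1 : (c::cs).length + 1 = cs.length + 2 := by simp
  rw [PySem.Chars.split₀Max]
  simp only [if_neg (by norm_num : ¬ (1:Int) < 0), Int.toNat_one, h1]
  rw [PySem.Chars.split₀Max.go]
  simp [hc]
  rw [PySem.Chars.split₀Max.go]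
  cases h : List.dropWhile PySem.Chars.isspace (List.dropWhile (fun x => !PySem.Chars.isspace x) cs) with
  | nil => simp
  | cons a l => simp

-- for a line starting with "Q": split(maxsplit=1) is [w] or [w, r] with w ≠ ""
theorem strSplitQ (line : String) (h : PySem.Str.startswith line "Q" = true) :
    (∃ w, PySem.Str.split₀Max line 1 = [w] ∧ w ≠ "") ∨
    (∃ w r, PySem.Str.split₀Max line 1 = [w, r] ∧ w ≠ "") := by
  have h' : PySem.Chars.startswith line.toList "Q".toList = true := by
    simpa using h
  rw [PySem.Chars.startswith_iff] at h'
  obtain ⟨t, ht⟩ := h'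
  have hl : line.toList = 'Q' :: t := by simpa using ht.symm
  have hsp : PySem.Str.split₀Max line 1 =
      (PySem.Chars.split₀Max line.toList 1).map String.ofList := rfl
  have hw : String.ofList ('Q' :: t.takeWhile (fun x => !PySem.Chars.isspace x)) ≠ "" := by
    intro hcon
    have : ('Q' :: t.takeWhile (fun x => !PySem.Chars.isspace x)) = ([] : List Char) := by
      have := congrArg String.toList hcon
      simpa using this
    simp at this
  rcases charsSplitQ 'Q' (by decide) t with hcase | ⟨r, hcase⟩
  · left
    exact ⟨_, by rw [hsp, hl, hcase]; simp, hw⟩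
  · right
    exact ⟨_, String.ofList r, by rw [hsp, hl, hcase]; simp, hw⟩

-- the per-unit invariant: A's stateful loop + trailing flush = B's chunk-slicing recursion
theorem pvMain (lines : List String) (unit : String) (qs : List (List (String × String))) :
    (∀ qid buf, qid ≠ "" →
      pvFinish unit (lines.foldl (pvStepA unit) (some qid, buf, qs)) =
        pvChunks unit (lines.dropWhile (fun l => !pvIsQ l))
          (qs ++ [pvRec unit qid (buf ++ lines.takeWhile (fun l => !pvIsQ l))])) ∧
    pvFinish unit (lines.foldl (pvStepA unit) (none, ([] : List String), qs)) =
      pvChunks unit (lines.dropWhile (fun l => !pvIsQ l)) qs := by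
  induction lines generalizing qs with
  | nil =>
    constructor
    · intro qid buf hq
      simp [pvFinish, pvFlush, pvChunks.eq_1, hq]
    · simp [pvFinish, pvFlush, pvChunks.eq_1]
  | cons l ls ih =>
    by_cases hq : pvIsQ l = true
    · have hsw : PySem.Str.startswith l "Q" = true := by
        unfold pvIsQ at hq
        simp only [Bool.and_eq_true] at hq
        exact hq.1.1
      have hchunk : ∀ (ps : List String) (X : List (List (String × String))) (w : String),
          PySem.Str.split₀Max l 1 = w :: ps →
          pvChunks unit (l :: ls) X =
            pvChunks unit (ls.dropWhile (fun x => !pvIsQ x))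
              (X ++ [pvRec unit w (ps ++ ls.takeWhile (fun x => !pvIsQ x))]) := by
        intro ps X w hsp
        rw [pvChunks.eq_2, hsp]
        simp only [drop_findIdx, take_findIdx]
      rcases strSplitQ l hsw with ⟨w, hsp, hw⟩ | ⟨w, r, hsp, hw⟩
      · constructor
        · intro qid buf hqid
          rw [List.foldl_cons]
          have hA : pvStepA unit (some qid, buf, qs) l =
              (some w, [], qs ++ [pvRec unit qid buf]) := by
            simp [pvStepA, hq, hsp, pvFlush, hqid]
          rw [hA, (ih (qs ++ [pvRec unit qid buf])).1 w [] hw]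
          rw [List.dropWhile_cons_of_neg (by simp [hq]),
              List.takeWhile_cons_of_neg (by simp [hq]),
              hchunk [] (qs ++ [pvRec unit qid (buf ++ [])]) w hsp]
          simp
        · rw [List.foldl_cons]
          have hA : pvStepA unit (none, [], qs) l = (some w, [], qs) := by
            simp [pvStepA, hq, hsp, pvFlush]
          rw [hA, (ih qs).1 w [] hw,
              List.dropWhile_cons_of_neg (by simp [hq]),
              hchunk [] qs w hsp]
      · constructor
        · intro qid buf hqid
          rw [List.foldl_cons]
          have hA : pvStepA unit (some qid, buf, qs) l =
              (some w, [r], qs ++ [pvRec unit qid buf]) := by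
            simp [pvStepA, hq, hsp, pvFlush, hqid]
          rw [hA, (ih (qs ++ [pvRec unit qid buf])).1 w [r] hw]
          rw [List.dropWhile_cons_of_neg (by simp [hq]),
              List.takeWhile_cons_of_neg (by simp [hq]),
              hchunk [r] (qs ++ [pvRec unit qid (buf ++ [])]) w hsp]
          simp
        · rw [List.foldl_cons]
          have hA : pvStepA unit (none, [], qs) l = (some w, [r], qs) := by
            simp [pvStepA, hq, hsp, pvFlush]
          rw [hA, (ih qs).1 w [r] hw,
              List.dropWhile_cons_of_neg (by simp [hq]),
              hchunk [r] qs w hsp]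
    · constructor
      · intro qid buf hqid
        rw [List.foldl_cons]
        have hA : pvStepA unit (some qid, buf, qs) l = (some qid, buf ++ [l], qs) := by
          simp [pvStepA, hq, hqid]
        rw [hA, (ih qs).1 qid (buf ++ [l]) hqid,
            List.dropWhile_cons_of_pos (by simp [hq]),
            List.takeWhile_cons_of_pos (by simp [hq])]
        simp
      · rw [List.foldl_cons]
        have hA : pvStepA unit (none, [], qs) l = (none, [], qs) := by
          simp [pvStepA, hq]
        rw [hA, (ih qs).2, List.dropWhile_cons_of_pos (by simp [hq])]

theorem pvTop (units : List (String × List String)) (qs : List (List (String × String))) :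
    units.foldl (fun qs p => pvFinish p.1 (p.2.foldl (pvStepA p.1) (none, [], qs))) qs =
    units.foldl (fun qs p => pvChunks p.1 (p.2.drop (p.2.findIdx pvIsQ)) qs) qs := by
  induction units generalizing qs with
  | nil => rfl
  | cons u us ih =>
    rw [List.foldl_cons, List.foldl_cons, (pvMain u.2 u.1 qs).2, drop_findIdx]
    exact ih _

-- ===== VERDICT (by name: the statement is the Claim_ definition above) =====
theorem split_questions_in_units_spec : Claim_equal_split_questions_in_units := by
  intro units _
  unfold Spec_split_questions_in_units split_questions_in_units split_questions_in_units_alt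
  exact pvTop units []
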